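-- pv_equiv track=rewrite | github.com/AgEnT4770/Intelligent-connect-6-player | heuristics.py | center_control
-- ===== SOURCE A (Python) =====
-- def center_control(board, player):
--     N = len(board)
--     midR, midC = (N-1)//2, (N-1)//2 #-1 to work for both even and odd
--     total = 0
--     for r in range(N):
--         for c in range(N):
--             if board[r][c] == player:
--                 dist = abs(r - midR) + abs(c - midC) #manhattan distance
--                 total += -dist
--     return total
-- ===== SOURCE B (Python) =====
-- def center_control(board, player):
--     # Marginal decomposition: Manhattan distance is separable per axis, so
--     # weight row counts and column counts by the per-axis distances.
--     N = len(board)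
--     mid = (N - 1) // 2
--     row_part = sum(board[r][:N].count(player) * abs(r - mid) for r in range(N))
--     col_part = sum(sum(1 for r in range(N) if board[r][c] == player) * abs(c - mid)
--                    for c in range(N))
--     return -(row_part + col_part)
-- ===== Notes on version B (the rewrite author's own statement) =====
-- stated objective: alternative
-- what changed: Replaces the per-cell Manhattan-distance accumulation with a marginal decomposition: row counts (via list.count on each row prefix) weighted by |r-mid| plus column counts weighted by |c-mid|, exploiting the additive separability of the Manhattan distance.
import Mathlib
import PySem

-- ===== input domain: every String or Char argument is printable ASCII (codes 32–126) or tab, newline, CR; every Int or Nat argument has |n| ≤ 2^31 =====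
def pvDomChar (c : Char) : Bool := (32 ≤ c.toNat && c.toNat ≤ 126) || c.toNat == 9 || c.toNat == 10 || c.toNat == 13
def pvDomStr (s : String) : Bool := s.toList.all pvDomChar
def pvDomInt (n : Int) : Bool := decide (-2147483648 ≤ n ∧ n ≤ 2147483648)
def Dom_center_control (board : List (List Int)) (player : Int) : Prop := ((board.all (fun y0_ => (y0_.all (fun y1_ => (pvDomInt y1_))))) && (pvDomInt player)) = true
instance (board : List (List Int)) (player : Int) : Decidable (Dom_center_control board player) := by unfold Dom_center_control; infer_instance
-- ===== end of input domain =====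

-- B changes the decomposition: per-axis marginal passes (row counts weighted by |r-mid|,
-- column counts weighted by |c-mid|) instead of per-cell Manhattan sums; same cost (alternative).

-- ===== PORT A =====
-- board[r][c] is ported with pyGetD; Pre_ excludes exactly the inputs where the
-- Python raises IndexError (a row shorter than the column range).
def center_control (board : List (List Int)) (player : Int) : Int :=
  let N : Int := board.length
  let midR : Int := PySem.Int.floordiv (N - 1) 2
  let midC : Int := PySem.Int.floordiv (N - 1) 2
  (PySem.List.pyRange 0 N 1).foldl (fun total r =>
    (PySem.List.pyRange 0 N 1).foldl (fun total c =>
      if PySem.List.pyGetD (PySem.List.pyGetD board r []) c 0 = player then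
        total + -((r - midR).natAbs + (c - midC).natAbs : Int)
      else total) total) 0

-- ===== PORT B =====
def center_control_alt (board : List (List Int)) (player : Int) : Int :=
  let N : Int := board.length
  let mid : Int := PySem.Int.floordiv (N - 1) 2
  let rowPart : Int :=
    ((PySem.List.pyRange 0 N 1).map (fun r =>
      ((PySem.List.slice (PySem.List.pyGetD board r []) none (some N)).count player : Int)
        * ((r - mid).natAbs : Int))).sum
  let colPart : Int :=
    ((PySem.List.pyRange 0 N 1).map (fun c =>
      ((PySem.List.pyRange 0 N 1).map (fun r =>
        if PySem.List.pyGetD (PySem.List.pyGetD board r []) c 0 = player then (1 : Int) else 0)).sum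
        * ((c - mid).natAbs : Int))).sum
  Neg.neg (rowPart + colPart)

-- ===== PRECONDITION & SPEC =====
-- Pre_ excludes exactly the inputs where A raises IndexError: some row shorter
-- than the number of rows (board[r][c] is read for every c < len(board)).
def Pre_center_control (board : List (List Int)) (player : Int) : Prop :=
  ∀ row ∈ board, board.length ≤ row.length
instance (board : List (List Int)) (player : Int) : Decidable (Pre_center_control board player) := by unfold Pre_center_control; infer_instance

def pvWitness_center_control : List (List Int) × Int := ([[1, 0], [0, 1]], 1)

def Spec_center_control (board : List (List Int)) (player : Int) (out : Int) : Prop := out = center_control_alt board player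
instance (board : List (List Int)) (player : Int) (out : Int) : Decidable (Spec_center_control board player out) := by unfold Spec_center_control; infer_instance

-- ===== CLAIM (what is proved, stated in full; the proofs are below) =====
def Claim_equal_center_control : Prop := ∀ (board : List (List Int)) (player : Int), Dom_center_control board player → Pre_center_control board player → Spec_center_control board player (center_control board player)

-- ===== LEMMAS AND PROOFS =====

def pvMid (n : Nat) : Int := PySem.Int.floordiv ((n : Int) - 1) 2
def pvD (n k : Nat) : Int := (((k : Int) - pvMid n).natAbs : Int)

lemma pv_sum_range (n : Nat) (f : Nat → Int) :
    ((List.range n).map f).sum = ∑ i ∈ Finset.range n, f i := rfl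

-- loop shape of A's inner loop: conditional accumulation is a sum of ites
lemma pv_foldl_ite_add (l : List Nat) (P : Nat → Prop) [DecidablePred P] (g : Nat → Int) (t : Int) :
    l.foldl (fun t c => if P c then t + g c else t) t
      = t + (l.map (fun c => if P c then g c else 0)).sum := by
  have h := PySem.List.foldl_congr_mem (l := l) (init := t)
    (f := fun t c => if P c then t + g c else t)
    (g := fun t c => t + (if P c then g c else 0))
    (by intro acc x _; simp only []; split_ifs <;> simp)
  rw [h]; exact PySem.List.foldl_add _ _ _

-- A is the double sum of per-cell negated Manhattan distances
lemma pv_A_eq (board : List (List Int)) (player : Int) :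
    center_control board player
      = ∑ r ∈ Finset.range board.length, ∑ c ∈ Finset.range board.length,
          (if (board.getD r []).getD c 0 = player
           then -(pvD board.length r + pvD board.length c) else 0) := by
  unfold center_control
  simp only [PySem.List.pyRange_zero_natCast, List.foldl_map, PySem.List.pyGetD_natCast]
  have hinner : ∀ (t : Int) (r : Nat),
      (List.range board.length).foldl (fun t c =>
        if (board.getD r []).getD c 0 = player
        then t + -((((r : Int) - PySem.Int.floordiv ((board.length : Int) - 1) 2).natAbs : Int)
                 + (((c : Int) - PySem.Int.floordiv ((board.length : Int) - 1) 2).natAbs : Int))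
        else t) t
      = t + ∑ c ∈ Finset.range board.length,
          (if (board.getD r []).getD c 0 = player
           then -(pvD board.length r + pvD board.length c) else 0) := by
    intro t r
    rw [pv_foldl_ite_add]
    congr 1
  simp only [hinner]
  rw [PySem.List.foldl_add (List.range board.length)
      (fun r => ∑ c ∈ Finset.range board.length,
        (if (board.getD r []).getD c 0 = player
         then -(pvD board.length r + pvD board.length c) else 0)) 0]
  rw [zero_add, pv_sum_range]

-- list.count on a prefix is the 0/1 sum over its indices
lemma pv_count_eq (row : List Int) (p : Int) (n : Nat) (h : n ≤ row.length) :
    ((row.take n).count p : Int) = ∑ c ∈ Finset.range n, (if row.getD c 0 = p then (1:Int) else 0) := by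
  induction n with
  | zero => simp
  | succ m ih =>
    have hm : m < row.length := by omega
    rw [List.take_add_one, Finset.sum_range_succ, ← ih (by omega)]
    rw [List.count_append, List.getD_eq_getElem _ _ hm, List.getElem?_eq_getElem hm]
    simp only [Option.toList_some, List.count_singleton]
    push_cast
    by_cases hh : row[m] = p
    · simp [hh]
    · simp [hh]

-- B is the marginal form: row counts weighted by pvD r plus column counts weighted by pvD c
lemma pv_B_eq (board : List (List Int)) (player : Int)
    (hpre : ∀ row ∈ board, board.length ≤ row.length) :
    center_control_alt board player
      = -((∑ r ∈ Finset.range board.length,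
            (∑ c ∈ Finset.range board.length,
              if (board.getD r []).getD c 0 = player then (1:Int) else 0) * pvD board.length r)
        + ∑ c ∈ Finset.range board.length,
            (∑ r ∈ Finset.range board.length,
              if (board.getD r []).getD c 0 = player then (1:Int) else 0) * pvD board.length c) := by
  unfold center_control_alt
  simp only [PySem.List.pyRange_zero_natCast, List.map_map, Function.comp_def,
    PySem.List.pyGetD_natCast, PySem.List.slice_to_natCast]
  rw [pv_sum_range, pv_sum_range]
  refine congrArg Neg.neg (congrArg₂ (· + ·) (Finset.sum_congr rfl ?_) (Finset.sum_congr rfl ?_))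
  · intro r hr
    have hrlt : r < board.length := Finset.mem_range.mp hr
    have hrow : board.length ≤ (board.getD r []).length := by
      rw [List.getD_eq_getElem _ _ hrlt]
      exact hpre _ (List.getElem_mem hrlt)
    rw [pv_count_eq _ _ _ hrow]
    rfl
  · intro c hc
    rw [pv_sum_range]
    rfl

-- the separability identity: per-cell Manhattan double sum = marginal form
lemma pv_key (n : Nat) (P : Nat → Nat → Prop) [∀ r c, Decidable (P r c)] (x y : Nat → Int) :
    ∑ r ∈ Finset.range n, ∑ c ∈ Finset.range n, (if P r c then -(x r + y c) else 0)
    = -((∑ r ∈ Finset.range n, (∑ c ∈ Finset.range n, if P r c then (1:Int) else 0) * x r)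
       + ∑ c ∈ Finset.range n, (∑ r ∈ Finset.range n, if P r c then (1:Int) else 0) * y c) := by
  have h1 : ∀ r c, (if P r c then -(x r + y c) else 0)
      = (if P r c then (1:Int) else 0) * (-(x r)) + (if P r c then (1:Int) else 0) * (-(y c)) := by
    intro r c; split_ifs <;> ring
  simp only [h1, Finset.sum_add_distrib]
  rw [Finset.sum_comm (f := fun r c => (if P r c then (1:Int) else 0) * (-(y c)))]
  simp only [← Finset.sum_mul, mul_neg, Finset.sum_neg_distrib]
  ring

-- ===== VERDICT (by name: the statement is the Claim_ definition above) =====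
theorem center_control_spec : Claim_equal_center_control := by
  intro board player _ hpre
  unfold Spec_center_control
  rw [pv_A_eq, pv_B_eq board player hpre,
    pv_key board.length (fun r c => (board.getD r []).getD c 0 = player)
      (pvD board.length) (pvD board.length)]
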